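-- pv_equiv track=rewrite | github.com/LandGrey/domainNamePredictor | dnp.py | name_filter
-- ===== SOURCE A (Python) =====
-- def name_filter(name, original_domain, domain_prefix):
--     js_chunk = []
--     if "-" in name:
--         for v1 in name.split("."):
--             for v2 in v1.split("-"):
--                 js_chunk.append(v2)
--     else:
--         js_chunk = name.split(".")
--
--     name_length = len(name)
--     js_chunk_length = len(js_chunk)
--
--     if js_chunk_length >= 3:
--         # drop      aa.bb.cc/aa-bb-cc/aa-bb.cc/aa.bb-cc     too short name
--         if name_length <= (js_chunk_length * 2 + js_chunk_length - 1):
--             return None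
--         # drop      aaaaaa-bbbbbb-cccccc        too long name
--         if name.count("-") >= js_chunk_length - 1 and name_length >= (js_chunk_length * 6 + js_chunk_length - 1):
--             return None
--         # drop      aaaaaaaa./-bbbbbbbb./-cccccccc  too long name
--         if name_length >= (js_chunk_length * 8 + js_chunk_length - 1):
--             return None
--
--     if domain_prefix:
--         if domain_prefix in js_chunk:
--             if len(js_chunk) <= 3:
--                 return name + "." + original_domain[len(domain_prefix) + 1:]
--         else:
--             return name + "." + original_domain
--     else:
--         return name + "." + original_domain
--     return None
-- ===== SOURCE B (Python) =====
-- def name_filter(name, original_domain, domain_prefix):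
--     # one character pass builds the chunk list (split on '.' and '-' at once),
--     # replacing A's branch on '-' with its nested split('.')/split('-') loops
--     chunks = []
--     cur = ''
--     for ch in name:
--         if ch == '.' or ch == '-':
--             chunks.append(cur)
--             cur = ''
--         else:
--             cur = cur + ch
--     chunks.append(cur)
--
--     n = len(name)
--     k = len(chunks)
--     if k >= 3 and (n <= 3 * k - 1
--                    or (name.count('-') >= k - 1 and n >= 7 * k - 1)
--                    or n >= 9 * k - 1):
--         return None
--     if not domain_prefix or domain_prefix not in chunks:
--         return name + '.' + original_domain
--     if k <= 3:
--         return name + '.' + original_domain[len(domain_prefix) + 1:]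
--     return None
-- ===== Notes on version B (the rewrite author's own statement) =====
-- stated objective: simpler
-- what changed: A's branch on '-' with nested split('.')/split('-') loops is replaced by a single character pass that splits on '.' and '-' at once, and the three sequential length guards are folded into one condition with guard-style returns.
import Mathlib
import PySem

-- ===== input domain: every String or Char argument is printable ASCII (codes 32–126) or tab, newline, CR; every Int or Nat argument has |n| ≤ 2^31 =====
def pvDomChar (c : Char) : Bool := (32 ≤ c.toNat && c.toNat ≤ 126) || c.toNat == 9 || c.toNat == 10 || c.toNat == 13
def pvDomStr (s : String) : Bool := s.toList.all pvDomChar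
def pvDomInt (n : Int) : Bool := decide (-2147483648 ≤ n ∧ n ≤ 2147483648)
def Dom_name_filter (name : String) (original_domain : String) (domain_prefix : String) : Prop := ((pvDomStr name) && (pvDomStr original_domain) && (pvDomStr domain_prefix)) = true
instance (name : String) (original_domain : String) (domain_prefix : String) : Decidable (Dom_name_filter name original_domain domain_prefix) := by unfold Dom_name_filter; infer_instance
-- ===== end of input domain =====

-- B replaces A's branch on '-' with its two nested splits by one character pass
-- that splits on '.' and '-' at once; the guards are folded into one condition (objective: simpler).

-- ===== PORT A =====
-- the code after the length guards (Python's fall-through tail), shared by A's branches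
def nfTail (js_chunk : List (List Char)) (name : String) (original_domain : String)
    (domain_prefix : String) : Option String :=
  if domain_prefix ≠ "" then
    if js_chunk.contains domain_prefix.toList then
      if js_chunk.length ≤ 3 then
        some (String.ofList (name.toList ++ '.' ::
          PySem.Chars.slice original_domain.toList (some ((domain_prefix.toList.length : Int) + 1)) none))
      else none
    else some (String.ofList (name.toList ++ '.' :: original_domain.toList))
  else some (String.ofList (name.toList ++ '.' :: original_domain.toList))

def name_filter (name : String) (original_domain : String) (domain_prefix : String) : Option String :=
  let js_chunk : List (List Char) :=
    if PySem.Str.isIn "-" name then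
      (PySem.Chars.splitOn name.toList ['.']).foldl
        (fun acc v1 => (PySem.Chars.splitOn v1 ['-']).foldl (fun acc2 v2 => acc2 ++ [v2]) acc) []
    else PySem.Chars.splitOn name.toList ['.']
  let name_length : Int := PySem.Str.len name
  let k : Int := (js_chunk.length : Int)
  if 3 ≤ k then
    if name_length ≤ k * 2 + k - 1 then none
    else if k - 1 ≤ (PySem.Str.count name "-" : Int) ∧ k * 6 + k - 1 ≤ name_length then none
    else if k * 8 + k - 1 ≤ name_length then none
    else nfTail js_chunk name original_domain domain_prefix
  else nfTail js_chunk name original_domain domain_prefix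

-- ===== PORT B =====
def name_filter_alt (name : String) (original_domain : String) (domain_prefix : String) : Option String :=
  let st := name.toList.foldl
    (fun (st : List (List Char) × List Char) ch =>
      if ch = '.' ∨ ch = '-' then (st.1 ++ [st.2], []) else (st.1, st.2 ++ [ch]))
    ([], [])
  let chunks := st.1 ++ [st.2]
  let n : Int := PySem.Str.len name
  let k : Int := (chunks.length : Int)
  if 3 ≤ k ∧ (n ≤ 3 * k - 1 ∨
      ((k - 1 ≤ (PySem.Str.count name "-" : Int)) ∧ 7 * k - 1 ≤ n) ∨ 9 * k - 1 ≤ n) then none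
  else if domain_prefix = "" ∨ ¬ chunks.contains domain_prefix.toList then
    some (String.ofList (name.toList ++ '.' :: original_domain.toList))
  else if (chunks.length : Int) ≤ 3 then
    some (String.ofList (name.toList ++ '.' ::
      PySem.Chars.slice original_domain.toList (some ((domain_prefix.toList.length : Int) + 1)) none))
  else none

-- ===== PRECONDITION & SPEC =====
def Spec_name_filter (name : String) (original_domain : String) (domain_prefix : String) (out : Option String) : Prop := out = name_filter_alt name original_domain domain_prefix
instance (name : String) (original_domain : String) (domain_prefix : String) (out : Option String) : Decidable (Spec_name_filter name original_domain domain_prefix out) := by unfold Spec_name_filter; infer_instance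

-- ===== CLAIM (what is proved, stated in full; the proofs are below) =====
def Claim_equal_name_filter : Prop := ∀ (name : String) (original_domain : String) (domain_prefix : String), Dom_name_filter name original_domain domain_prefix → Spec_name_filter name original_domain domain_prefix (name_filter name original_domain domain_prefix)

-- ===== LEMMAS AND PROOFS =====

-- prepend a list to the first piece (the piece list is never empty)
def prependFirst (p : List Char) : List (List Char) → List (List Char)
  | [] => [p]
  | h :: t => (p ++ h) :: t

-- reference single-character split
def splitD (d : Char) : List Char → List (List Char)
  | [] => [[]]
  | c :: rest => if c = d then [] :: splitD d rest else prependFirst [c] (splitD d rest)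

-- reference split on '.' and '-' at once (B's one pass)
def splitBoth : List Char → List (List Char)
  | [] => [[]]
  | c :: rest =>
    if c = '.' ∨ c = '-' then [] :: splitBoth rest else prependFirst [c] (splitBoth rest)

theorem prependFirst_ne_nil (p : List Char) (xs : List (List Char)) : prependFirst p xs ≠ [] := by
  cases xs <;> simp [prependFirst]

theorem splitD_ne_nil (d : Char) (l : List Char) : splitD d l ≠ [] := by
  cases l with
  | nil => simp [splitD]
  | cons c rest =>
    simp only [splitD]
    split
    · simp
    · exact prependFirst_ne_nil _ _

theorem splitBoth_ne_nil (l : List Char) : splitBoth l ≠ [] := by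
  cases l with
  | nil => simp [splitBoth]
  | cons c rest =>
    simp only [splitBoth]
    split
    · simp
    · exact prependFirst_ne_nil _ _

theorem prependFirst_nil (xs : List (List Char)) (h : xs ≠ []) : prependFirst [] xs = xs := by
  cases xs with
  | nil => exact absurd rfl h
  | cons a t => simp [prependFirst]

theorem prependFirst_prependFirst (p q : List Char) (xs : List (List Char)) :
    prependFirst p (prependFirst q xs) = prependFirst (p ++ q) xs := by
  cases xs <;> simp [prependFirst]

theorem prependFirst_append (p : List Char) (xs ys : List (List Char)) (h : xs ≠ []) :
    prependFirst p xs ++ ys = prependFirst p (xs ++ ys) := by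
  cases xs with
  | nil => exact absurd rfl h
  | cons a t => simp [prependFirst]

theorem splitOn_go_eq (d : Char) (l : List Char) :
    ∀ (fuel : Nat) (cur : List Char) (acc : List (List Char)), l.length ≤ fuel →
    PySem.Chars.splitOn.go [d] fuel l cur acc = acc.reverse ++ prependFirst cur.reverse (splitD d l) := by
  induction l with
  | nil =>
    intro fuel cur acc _
    cases fuel <;> simp [PySem.Chars.splitOn.go, splitD, prependFirst]
  | cons c rest ih =>
    intro fuel cur acc hf
    cases fuel with
    | zero => simp at hf
    | succ fuel =>
      rw [PySem.Chars.splitOn.go.eq_def]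
      simp only [List.isPrefixOf, Bool.and_true]
      by_cases hcd : c = d
      · subst hcd
        simp only [BEq.rfl, if_pos, List.length_singleton, List.drop_one, List.tail_cons]
        rw [ih fuel [] (cur.reverse :: acc) (by simp only [List.length_cons] at hf; omega)]
        rw [List.reverse_nil, prependFirst_nil _ (splitD_ne_nil _ _)]
        rw [show splitD c (c :: rest) = [] :: splitD c rest by simp [splitD]]
        simp [prependFirst]
      · have hdc : (d == c) = false := by
          exact beq_eq_false_iff_ne.mpr (fun h => hcd h.symm)
        rw [hdc]
        simp only [Bool.false_eq_true, if_false]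
        rw [ih fuel (c :: cur) acc (by simp only [List.length_cons] at hf; omega)]
        rw [show splitD d (c :: rest) = prependFirst [c] (splitD d rest) by
          simp only [splitD, if_neg hcd]]
        rw [prependFirst_prependFirst]
        simp

theorem splitOn_single (d : Char) (l : List Char) :
    PySem.Chars.splitOn l [d] = splitD d l := by
  unfold PySem.Chars.splitOn
  rw [splitOn_go_eq d l (l.length + 1) [] [] (Nat.le_succ _)]
  simp [prependFirst_nil _ (splitD_ne_nil d l)]

theorem scan_spec (cs : List Char) :
    ∀ (done : List (List Char)) (cur : List Char),
    (cs.foldl (fun (st : List (List Char) × List Char) ch =>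
        if ch = '.' ∨ ch = '-' then (st.1 ++ [st.2], []) else (st.1, st.2 ++ [ch])) (done, cur)).1
      ++ [(cs.foldl (fun (st : List (List Char) × List Char) ch =>
        if ch = '.' ∨ ch = '-' then (st.1 ++ [st.2], []) else (st.1, st.2 ++ [ch])) (done, cur)).2]
      = done ++ prependFirst cur (splitBoth cs) := by
  induction cs with
  | nil => intro done cur; simp [splitBoth, prependFirst]
  | cons c rest ih =>
    intro done cur
    simp only [List.foldl_cons]
    by_cases hc : c = '.' ∨ c = '-'
    · simp only [if_pos hc, ih]
      rw [prependFirst_nil _ (splitBoth_ne_nil rest)]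
      simp [splitBoth, hc, prependFirst, List.append_assoc]
    · simp only [if_neg hc, ih]
      simp [splitBoth, hc, prependFirst_prependFirst]

theorem splitBoth_eq_flatMap (cs : List Char) :
    splitBoth cs = (splitD '.' cs).flatMap (splitD '-') := by
  induction cs with
  | nil => simp [splitBoth, splitD]
  | cons c rest ih =>
    by_cases hdot : c = '.'
    · subst hdot
      simp [splitBoth, splitD, ih]
    · by_cases hdash : c = '-'
      · subst hdash
        obtain ⟨h, t, ht⟩ := List.exists_cons_of_ne_nil (splitD_ne_nil '.' rest)
        rw [show splitBoth ('-' :: rest) = [] :: splitBoth rest by simp [splitBoth]]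
        rw [show splitD '.' ('-' :: rest) = prependFirst ['-'] (splitD '.' rest) by
          simp [splitD, hdot]]
        rw [ih, ht]
        simp only [prependFirst, List.singleton_append, List.flatMap_cons]
        rw [show splitD '-' ('-' :: h) = [] :: splitD '-' h by simp [splitD]]
        simp
      · have hc : ¬ (c = '.' ∨ c = '-') := by tauto
        obtain ⟨h, t, ht⟩ := List.exists_cons_of_ne_nil (splitD_ne_nil '.' rest)
        rw [show splitBoth (c :: rest) = prependFirst [c] (splitBoth rest) by
          simp [splitBoth, hc]]
        rw [show splitD '.' (c :: rest) = prependFirst [c] (splitD '.' rest) by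
          simp [splitD, hdot]]
        rw [ih, ht]
        simp only [prependFirst, List.singleton_append, List.flatMap_cons]
        rw [show splitD '-' (c :: h) = prependFirst [c] (splitD '-' h) by
          simp [splitD, hdash]]
        rw [prependFirst_append _ _ _ (splitD_ne_nil '-' h)]
        simp [prependFirst]

theorem mem_splitD (d : Char) (cs : List Char) :
    ∀ x ∈ splitD d cs, ∀ a ∈ x, a ∈ cs := by
  induction cs with
  | nil => intro x hx a ha; simp [splitD] at hx; simp [hx] at ha
  | cons c rest ih =>
    intro x hx a ha
    simp only [splitD] at hx
    split at hx
    · rcases List.mem_cons.mp hx with rfl | hx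
      · simp at ha
      · exact List.mem_cons_of_mem _ (ih x hx a ha)
    · obtain ⟨h, t, ht⟩ := List.exists_cons_of_ne_nil (splitD_ne_nil d rest)
      rw [ht] at hx
      simp only [prependFirst, List.singleton_append, List.mem_cons] at hx
      rcases hx with rfl | hx
      · rcases List.mem_cons.mp ha with rfl | ha
        · exact List.mem_cons_self
        · exact List.mem_cons_of_mem _ (ih h (by rw [ht]; exact List.mem_cons_self) a ha)
      · exact List.mem_cons_of_mem _ (ih x (by rw [ht]; exact List.mem_cons_of_mem _ hx) a ha)

theorem splitD_of_not_mem (d : Char) (l : List Char) (h : d ∉ l) : splitD d l = [l] := by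
  induction l with
  | nil => simp [splitD]
  | cons c rest ih =>
    simp only [List.mem_cons, not_or] at h
    simp [splitD, Ne.symm h.1, ih h.2, prependFirst]

-- the central fact: B's one-pass chunks equal A's js_chunk, in both of A's branches
theorem chunks_eq (name : String) :
    (name.toList.foldl (fun (st : List (List Char) × List Char) ch =>
        if ch = '.' ∨ ch = '-' then (st.1 ++ [st.2], []) else (st.1, st.2 ++ [ch])) ([], [])).1
      ++ [(name.toList.foldl (fun (st : List (List Char) × List Char) ch =>
        if ch = '.' ∨ ch = '-' then (st.1 ++ [st.2], []) else (st.1, st.2 ++ [ch])) ([], [])).2]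
      = (if PySem.Str.isIn "-" name then
          (PySem.Chars.splitOn name.toList ['.']).foldl
            (fun acc v1 => (PySem.Chars.splitOn v1 ['-']).foldl (fun acc2 v2 => acc2 ++ [v2]) acc) []
        else PySem.Chars.splitOn name.toList ['.']) := by
  rw [scan_spec, prependFirst_nil _ (splitBoth_ne_nil _), List.nil_append, splitBoth_eq_flatMap]
  by_cases hd : PySem.Str.isIn "-" name
  · rw [if_pos hd]
    have h1 : (fun (acc : List (List Char)) v1 =>
        (PySem.Chars.splitOn v1 ['-']).foldl (fun acc2 v2 => acc2 ++ [v2]) acc)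
        = (fun acc v1 => acc ++ PySem.Chars.splitOn v1 ['-']) := by
      funext acc v1; exact PySem.List.foldl_append_singleton _ _
    rw [h1, PySem.List.foldl_append_eq_flatMap, List.nil_append, splitOn_single]
    have h2 : (fun v1 => PySem.Chars.splitOn v1 ['-']) = splitD '-' := by
      funext v1; exact splitOn_single '-' v1
    rw [h2]
  · rw [if_neg hd]
    have hni : '-' ∉ name.toList := by
      have := (PySem.Chars.isIn_eq_false_iff "-".toList name.toList).mp
        (by simpa [PySem.Str.isIn] using eq_false_of_ne_true hd)
      simpa [List.singleton_infix_iff] using this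
    rw [splitOn_single]
    have : ∀ x ∈ splitD '.' name.toList, splitD '-' x = [x] := by
      intro x hx
      exact splitD_of_not_mem '-' x (fun ha => hni (mem_splitD '.' name.toList x hx '-' ha))
    calc (splitD '.' name.toList).flatMap (splitD '-')
        = (splitD '.' name.toList).flatMap (fun x => [x]) := by
          apply List.flatMap_congr; intro x hx; exact this x hx
      _ = splitD '.' name.toList := List.flatMap_singleton' _

-- ===== VERDICT (by name: the statement is the Claim_ definition above) =====
theorem name_filter_spec : Claim_equal_name_filter := by
  intro name original_domain domain_prefix _
  unfold Spec_name_filter name_filter name_filter_alt nfTail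
  dsimp only
  rw [← chunks_eq name]
  generalize (name.toList.foldl (fun (st : List (List Char) × List Char) ch =>
      if ch = '.' ∨ ch = '-' then (st.1 ++ [st.2], []) else (st.1, st.2 ++ [ch])) ([], [])).1
    ++ [(name.toList.foldl (fun (st : List (List Char) × List Char) ch =>
      if ch = '.' ∨ ch = '-' then (st.1 ++ [st.2], []) else (st.1, st.2 ++ [ch])) ([], [])).2] = chunks
  generalize PySem.Str.len name = n
  generalize (PySem.Str.count name "-" : Int) = m
  split_ifs <;> first | rfl | omega | tauto
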